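-- pv_equiv track=rewrite | github.com/mickhornung-oss/local-image-ai | python/multi_reference_adapter.py | derive_error_state
-- ===== SOURCE A (Python) =====
-- READINESS_ONLY_BLOCKERS = {"insufficient_multi_reference_images"}
--
-- BLOCKER_ERROR_MESSAGES = {
--     "multi_reference_store_unavailable": "Multi-reference store is unavailable.",
--     "missing_multi_reference_file": "A stored multi-reference slot points to a missing image file.",
--     "invalid_multi_reference_metadata": "Multi-reference metadata is incomplete or inconsistent.",
--     "invalid_multi_reference_image": "A stored multi-reference slot does not contain a valid image.",
--     "duplicate_multi_reference_slot": "Multiple stored multi-reference images claim the same slot.",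
--     "insufficient_multi_reference_images": "At least 2 multi-reference images are required.",
-- }
--
-- def derive_error_state(blockers: list[str]) -> tuple[str, str | None, str | None]:
--     if not blockers:
--         return "ok", None, None
--
--     prioritized_blockers = [
--         "multi_reference_store_unavailable",
--         "missing_multi_reference_file",
--         "invalid_multi_reference_metadata",
--         "invalid_multi_reference_image",
--         "duplicate_multi_reference_slot",
--         "insufficient_multi_reference_images",
--     ]
--     selected_blocker = next((blocker for blocker in prioritized_blockers if blocker in blockers), blockers[0])
--     status = "ok" if set(blockers).issubset(READINESS_ONLY_BLOCKERS) else "error"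
--     return status, selected_blocker, BLOCKER_ERROR_MESSAGES.get(selected_blocker)
-- ===== SOURCE B (Python) =====
-- READINESS_ONLY_BLOCKERS = {"insufficient_multi_reference_images"}
--
-- # priority-ordered (name, message) table: rank = position, message looked up by rank
-- _TABLE = [
--     ("multi_reference_store_unavailable", "Multi-reference store is unavailable."),
--     ("missing_multi_reference_file", "A stored multi-reference slot points to a missing image file."),
--     ("invalid_multi_reference_metadata", "Multi-reference metadata is incomplete or inconsistent."),
--     ("invalid_multi_reference_image", "A stored multi-reference slot does not contain a valid image."),
--     ("duplicate_multi_reference_slot", "Multiple stored multi-reference images claim the same slot."),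
--     ("insufficient_multi_reference_images", "At least 2 multi-reference images are required."),
-- ]
--
--
-- def _rank(b):
--     i = 0
--     for name, _ in _TABLE:
--         if name == b:
--             return i
--         i += 1
--     return i
--
--
-- def derive_error_state(blockers: list[str]) -> tuple[str, str | None, str | None]:
--     if not blockers:
--         return "ok", None, None
--     best = blockers[0]
--     best_rank = _rank(best)
--     ok = best in READINESS_ONLY_BLOCKERS
--     for b in blockers[1:]:
--         r = _rank(b)
--         if r < best_rank:
--             best, best_rank = b, r
--         ok = ok and (b in READINESS_ONLY_BLOCKERS)
--     message = _TABLE[best_rank][1] if best_rank < len(_TABLE) else None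
--     return ("ok" if ok else "error"), best, message
-- ===== Notes on version B (the rewrite author's own statement) =====
-- stated objective: alternative
-- what changed: Replaces A's scan over the priority list plus set.issubset plus message-dict lookup by one accumulator pass over the blockers that tracks the minimal-rank blocker (rank via a priority-ordered (name,message) table) and the readiness flag together, and reads the message by rank index into the table instead of a dict lookup.
import Mathlib
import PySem

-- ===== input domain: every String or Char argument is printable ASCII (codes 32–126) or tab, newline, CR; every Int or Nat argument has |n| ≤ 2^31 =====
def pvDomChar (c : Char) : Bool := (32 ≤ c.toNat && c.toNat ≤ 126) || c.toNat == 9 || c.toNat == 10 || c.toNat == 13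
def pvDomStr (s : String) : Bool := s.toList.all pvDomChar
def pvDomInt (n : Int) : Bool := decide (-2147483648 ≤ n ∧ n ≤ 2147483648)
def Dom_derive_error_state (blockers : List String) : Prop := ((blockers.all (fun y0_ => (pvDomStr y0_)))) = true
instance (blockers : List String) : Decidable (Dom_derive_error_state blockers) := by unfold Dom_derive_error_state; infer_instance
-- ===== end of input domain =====

-- B replaces A's priority-list scan + set.issubset + message-dict lookup by one accumulator
-- pass over the blockers tracking (best, best_rank, ok), with rank and message read from one
-- priority-ordered (name, message) table (alternative decomposition, same cost).

-- module constants shared by both Pythons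
def pvReadiness : PySem.Set String := PySem.Set.ofList ["insufficient_multi_reference_images"]

-- ===== PORT A =====
def pvMessages : PySem.Dict String String := PySem.Dict.mk [
  ("multi_reference_store_unavailable", "Multi-reference store is unavailable."),
  ("missing_multi_reference_file", "A stored multi-reference slot points to a missing image file."),
  ("invalid_multi_reference_metadata", "Multi-reference metadata is incomplete or inconsistent."),
  ("invalid_multi_reference_image", "A stored multi-reference slot does not contain a valid image."),
  ("duplicate_multi_reference_slot", "Multiple stored multi-reference images claim the same slot."),
  ("insufficient_multi_reference_images", "At least 2 multi-reference images are required.")]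

def pvPrioritized : List String := [
  "multi_reference_store_unavailable",
  "missing_multi_reference_file",
  "invalid_multi_reference_metadata",
  "invalid_multi_reference_image",
  "duplicate_multi_reference_slot",
  "insufficient_multi_reference_images"]

def derive_error_state (blockers : List String) : String × Option String × Option String :=
  if blockers = [] then ("ok", none, none)
  else
    let selected_blocker := (pvPrioritized.find? (fun blocker => blockers.contains blocker)).getD (blockers.headD "")
    let status := if PySem.Set.issubset (PySem.Set.ofList blockers) pvReadiness then "ok" else "error"
    (status, some selected_blocker, pvMessages.get? selected_blocker)

-- ===== PORT B =====
-- _TABLE: priority-ordered (name, message) pairs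
def pvTable : List (String × String) := [
  ("multi_reference_store_unavailable", "Multi-reference store is unavailable."),
  ("missing_multi_reference_file", "A stored multi-reference slot points to a missing image file."),
  ("invalid_multi_reference_metadata", "Multi-reference metadata is incomplete or inconsistent."),
  ("invalid_multi_reference_image", "A stored multi-reference slot does not contain a valid image."),
  ("duplicate_multi_reference_slot", "Multiple stored multi-reference images claim the same slot."),
  ("insufficient_multi_reference_images", "At least 2 multi-reference images are required.")]

-- _rank(b): scan the table with a counter
def pvRankGo (b : String) : Int → List (String × String) → Int
  | i, [] => i
  | i, (name, _) :: rest => if name = b then i else pvRankGo b (i + 1) rest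

def pvRankB (b : String) : Int := pvRankGo b 0 pvTable

-- the for-loop: accumulate (best, best_rank, ok)
def pvGo : String → Int → Bool → List String → String × Int × Bool
  | best, bestRank, ok, [] => (best, bestRank, ok)
  | best, bestRank, ok, b :: rest =>
      let r := pvRankB b
      if r < bestRank then pvGo b r (ok && pvReadiness.contains b) rest
      else pvGo best bestRank (ok && pvReadiness.contains b) rest

def derive_error_state_alt (blockers : List String) : String × Option String × Option String :=
  match blockers with
  | [] => ("ok", none, none)
  | h :: t =>
      let res := pvGo h (pvRankB h) (pvReadiness.contains h) t
      let message := if res.2.1 < 6 then (PySem.List.pyGet? pvTable res.2.1).map Prod.snd else none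
      ((if res.2.2 then "ok" else "error"), some res.1, message)

-- ===== PRECONDITION & SPEC =====
def Spec_derive_error_state (blockers : List String) (out : String × Option String × Option String) : Prop := out = derive_error_state_alt blockers
instance (blockers : List String) (out : String × Option String × Option String) : Decidable (Spec_derive_error_state blockers out) := by unfold Spec_derive_error_state; infer_instance

-- ===== CLAIM (what is proved, stated in full; the proofs are below) =====
def Claim_equal_derive_error_state : Prop := ∀ (blockers : List String), Dom_derive_error_state blockers → Spec_derive_error_state blockers (derive_error_state blockers)

-- ===== LEMMAS AND PROOFS =====

theorem pvRankB_eq (s : String) :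
    pvRankB s =
      if "multi_reference_store_unavailable" = s then 0
      else if "missing_multi_reference_file" = s then 1
      else if "invalid_multi_reference_metadata" = s then 2
      else if "invalid_multi_reference_image" = s then 3
      else if "duplicate_multi_reference_slot" = s then 4
      else if "insufficient_multi_reference_images" = s then 5
      else 6 := by
  simp only [pvRankB, pvTable, pvRankGo]
  norm_num

theorem pvRankB_nonneg (s : String) : 0 ≤ pvRankB s := by
  rw [pvRankB_eq]; split_ifs <;> norm_num

theorem pvRank_inj (s : String) (i : Nat) (hi : i < 6) (hr : pvRankB s = i) :
    pvPrioritized[i]? = some s := by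
  rw [pvRankB_eq] at hr
  split_ifs at hr with h0 h1 h2 h3 h4 h5
  · subst h0; have e : i = 0 := (by omega); subst e; rfl
  · subst h1; have e : i = 1 := (by omega); subst e; rfl
  · subst h2; have e : i = 2 := (by omega); subst e; rfl
  · subst h3; have e : i = 3 := (by omega); subst e; rfl
  · subst h4; have e : i = 4 := (by omega); subst e; rfl
  · subst h5; have e : i = 5 := (by omega); subst e; rfl
  · omega

theorem pvRank_pri (i : Nat) (s : String) (h : pvPrioritized[i]? = some s) :
    pvRankB s = i := by
  have hi : i < 6 := by
    obtain ⟨hlen, -⟩ := List.getElem?_eq_some_iff.mp h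
    simpa [pvPrioritized] using hlen
  interval_cases i <;> simp [pvPrioritized] at h <;> subst h <;> rfl

-- the minimum pvGo's best component computes, as a plain fold
def pvFoldMin (h : String) (t : List String) : String :=
  t.foldl (fun best b => if pvRankB b < pvRankB best then b else best) h

theorem foldMin_cons (h x : String) (xs : List String) :
    pvFoldMin h (x :: xs) = pvFoldMin (if pvRankB x < pvRankB h then x else h) xs := rfl

theorem go_spec (t : List String) (best : String) (ok : Bool) :
    pvGo best (pvRankB best) ok t =
      (pvFoldMin best t, pvRankB (pvFoldMin best t), ok && t.all (fun b => pvReadiness.contains b)) := by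
  induction t generalizing best ok with
  | nil => simp [pvGo, pvFoldMin]
  | cons b rest ih =>
      rw [foldMin_cons]
      by_cases hx : pvRankB b < pvRankB best <;>
        simp [pvGo, hx, ih, Bool.and_assoc]

theorem foldMin_mem (h : String) (t : List String) : pvFoldMin h t ∈ h :: t := by
  induction t generalizing h with
  | nil => simp [pvFoldMin]
  | cons x xs ih =>
      rw [foldMin_cons]
      by_cases hx : pvRankB x < pvRankB h <;>
        [have := ih x; have := ih h] <;>
        simp only [hx, if_pos, if_false, List.mem_cons] at this ⊢ <;>
        tauto

theorem foldMin_le_head (h : String) (t : List String) :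
    pvRankB (pvFoldMin h t) ≤ pvRankB h := by
  induction t generalizing h with
  | nil => simp [pvFoldMin]
  | cons x xs ih =>
      rw [foldMin_cons]
      by_cases hx : pvRankB x < pvRankB h
      · rw [if_pos hx]; have := ih x; omega
      · rw [if_neg hx]; exact ih h

theorem foldMin_min (h : String) (t : List String) :
    ∀ b ∈ t, pvRankB (pvFoldMin h t) ≤ pvRankB b := by
  induction t generalizing h with
  | nil => simp
  | cons x xs ih =>
      intro b hb
      rw [foldMin_cons]
      rcases List.mem_cons.mp hb with rfl | hb
      · have h1 := foldMin_le_head (if pvRankB b < pvRankB h then b else h) xs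
        by_cases hx : pvRankB b < pvRankB h <;> simp only [hx, if_true, if_false] at h1 ⊢ <;> omega
      · exact ih _ b hb

theorem foldMin_stay (h : String) (t : List String)
    (hall : ∀ b ∈ t, pvRankB h ≤ pvRankB b) : pvFoldMin h t = h := by
  induction t with
  | nil => rfl
  | cons x xs ih =>
      rw [foldMin_cons]
      have hx : ¬ pvRankB x < pvRankB h := by have := hall x (by simp); omega
      rw [if_neg hx]
      exact ih (fun b hb => hall b (by simp [hb]))

theorem pvRankB_le6 (s : String) : pvRankB s ≤ 6 := by
  rw [pvRankB_eq]; split_ifs <;> norm_num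

theorem find?_first {α : Type} (p : α → Bool) (xs : List α) (k : Nat) (hk : k < xs.length)
    (hp : p (xs[k]'hk) = true) (hfirst : ∀ j (hj : j < k), p (xs[j]'(by omega)) = false) :
    xs.find? p = some (xs[k]'hk) := by
  induction xs generalizing k with
  | nil => simp at hk
  | cons x t ih =>
      cases k with
      | zero =>
          have hpx : p x = true := hp
          rw [List.find?_cons_of_pos hpx]
          simp
      | succ k =>
          have h0 : p x = false := hfirst 0 (Nat.succ_pos k)
          rw [List.find?_cons_of_neg (by simp [h0])]
          exact ih k (by simpa using hk) hp (fun j hj => hfirst (j + 1) (by omega))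

theorem selected_eq (h : String) (t : List String) :
    (pvPrioritized.find? (fun blocker => (h :: t).contains blocker)).getD ((h :: t).headD "")
      = pvFoldMin h t := by
  set l := h :: t with hl
  set r := pvFoldMin h t with hr
  have hmem : r ∈ l := foldMin_mem h t
  have hminl : ∀ b ∈ l, pvRankB r ≤ pvRankB b := by
    intro b hb
    rcases List.mem_cons.mp hb with hbe | hb
    · rw [hbe]; exact foldMin_le_head h t
    · exact foldMin_min h t b hb
  by_cases hex : ∃ b ∈ l, pvRankB b < 6
  · -- some blocker is a known priority: find? returns the minimal-rank one, which is r
    obtain ⟨b, hb, hb6⟩ := hex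
    have hr6 : pvRankB r < 6 := lt_of_le_of_lt (hminl b hb) hb6
    have hr0 : 0 ≤ pvRankB r := pvRankB_nonneg r
    obtain ⟨k, hk⟩ : ∃ k : Nat, pvRankB r = k := ⟨(pvRankB r).toNat, by omega⟩
    have hk6 : k < 6 := by omega
    have hPk : pvPrioritized[k]? = some r := pvRank_inj r k hk6 hk
    have hklen : k < pvPrioritized.length := by simp [pvPrioritized]; omega
    have hPk' : pvPrioritized[k]'hklen = r := by
      have := List.getElem?_eq_getElem hklen
      rw [hPk] at this; exact (Option.some_inj.mp this).symm
    have hfind : pvPrioritized.find? (fun blocker => l.contains blocker)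
        = some (pvPrioritized[k]'hklen) := by
      apply find?_first _ _ k hklen
      · simpa [hPk'] using hmem
      · intro j hj
        have hjlen : j < pvPrioritized.length := by omega
        have hrank : pvRankB (pvPrioritized[j]'hjlen) = j :=
          pvRank_pri j _ (List.getElem?_eq_getElem hjlen)
        by_contra hc
        have hmemj : pvPrioritized[j]'hjlen ∈ l := by
          simpa using Bool.of_not_eq_false hc
        have := hminl _ hmemj
        omega
    rw [hfind, hPk']
    rfl
  · -- no known priority present: find? is none and the fold keeps the head
    push Not at hex
    have hfind : pvPrioritized.find? (fun blocker => l.contains blocker) = none := by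
      rw [List.find?_eq_none]
      intro x hx
      obtain ⟨i, hi, hxi⟩ := List.mem_iff_getElem.mp hx
      have hrank : pvRankB x = i := by
        rw [← hxi]; exact pvRank_pri i _ (List.getElem?_eq_getElem hi)
      have hi6 : i < 6 := by simpa [pvPrioritized] using hi
      intro hc
      have hmemx : x ∈ l := by simpa using hc
      have := hex x hmemx
      omega
    have hstay : pvFoldMin h t = h := by
      apply foldMin_stay
      intro b hb
      have h6b := hex b (by rw [hl]; exact List.mem_cons_of_mem _ hb)
      have := pvRankB_le6 h
      omega
    rw [hfind, hr, hstay]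
    rfl

theorem status_eq (l : List String) :
    PySem.Set.issubset (PySem.Set.ofList l) pvReadiness = l.all (fun b => pvReadiness.contains b) := by
  rw [Bool.eq_iff_iff]
  unfold PySem.Set.issubset
  simp only [List.all_eq_true]
  constructor
  · intro hs b hb
    exact hs b ((PySem.Set.mem_ofList l b).mpr hb)
  · intro hs b hb
    exact hs b ((PySem.Set.mem_ofList l b).mp hb)

theorem msg_eq (s : String) :
    (if pvRankB s < 6 then (PySem.List.pyGet? pvTable (pvRankB s)).map Prod.snd else none)
      = pvMessages.get? s := by
  have f : ∀ t : String, ¬ t = s → (t == s) = false := fun t h => by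
    simp only [beq_eq_false_iff_ne]; exact h
  by_cases h0 : "multi_reference_store_unavailable" = s
  · subst h0; decide
  by_cases h1 : "missing_multi_reference_file" = s
  · subst h1; decide
  by_cases h2 : "invalid_multi_reference_metadata" = s
  · subst h2; decide
  by_cases h3 : "invalid_multi_reference_image" = s
  · subst h3; decide
  by_cases h4 : "duplicate_multi_reference_slot" = s
  · subst h4; decide
  by_cases h5 : "insufficient_multi_reference_images" = s
  · subst h5; decide
  have hr : pvRankB s = 6 := by
    rw [pvRankB_eq]
    simp [h0, h1, h2, h3, h4, h5]
  rw [hr]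
  norm_num
  symm
  simp only [pvMessages, PySem.Dict.get?, List.find?, Option.map]
  rw [f _ h0, f _ h1, f _ h2, f _ h3, f _ h4, f _ h5]

-- ===== VERDICT (by name: the statement is the Claim_ definition above) =====
theorem derive_error_state_spec : Claim_equal_derive_error_state := by
  intro blockers _
  unfold Spec_derive_error_state derive_error_state derive_error_state_alt
  cases blockers with
  | nil => rfl
  | cons h t =>
      simp only [reduceCtorEq, if_false]
      rw [go_spec, status_eq, selected_eq, msg_eq]
      simp [List.all_cons]
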